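-- pv_equiv track=rewrite | github.com/HongDaeYong/codingStudy | DaeYong/3Heap/heapProb1.py | solution
-- ===== SOURCE A (Python) =====
-- import heapq
-- from heapq import heappop, heappush
--
-- def solution(scoville, K):
--     answer = 0
--     heapq.heapify(scoville)
--     min = heappop(scoville)
--     while min < K:
--         if len(scoville) <= 0:
--             return -1
--         answer += 1
--         heappush(scoville, min + 2 * heappop(scoville))
--         min = heappop(scoville)
--     return answer
-- ===== SOURCE B (Python) =====
-- def solution(scoville, K):
--     # Two-queue technique: sort the originals once; mix results are consumed in
--     # creation order from a FIFO (they come out in nondecreasing order, an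
--     # invariant provable from "every queued mix <= 3 * current minimum"), so the
--     # global minimum is always one of the two queue fronts. O(1) per mix, no heap.
--     base = sorted(scoville)
--     mixed = []
--     i = j = 0  # read positions in base and mixed
--
--     def take():
--         nonlocal i, j
--         if i < len(base) and (j >= len(mixed) or base[i] <= mixed[j]):
--             i += 1
--             return base[i - 1]
--         j += 1
--         return mixed[j - 1]
--
--     answer = 0
--     first = take()  # IndexError on empty input, like A's heappop
--     while first < K:
--         if i >= len(base) and j >= len(mixed):
--             return -1
--         answer += 1
--         mixed.append(first + 2 * take())
--         first = take()
--     return answer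
-- ===== Notes on version B (the rewrite author's own statement) =====
-- stated objective: faster
-- what changed: Replaces the priority queue entirely with the two-queue merge technique: sort the originals once, push each mix result onto a FIFO (results come out in nondecreasing order, provable from the invariant that every queued mix is at most 3x the current minimum), and take each minimum by comparing the two queue fronts in O(1), so no heap operation remains in the loop.
import Mathlib
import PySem

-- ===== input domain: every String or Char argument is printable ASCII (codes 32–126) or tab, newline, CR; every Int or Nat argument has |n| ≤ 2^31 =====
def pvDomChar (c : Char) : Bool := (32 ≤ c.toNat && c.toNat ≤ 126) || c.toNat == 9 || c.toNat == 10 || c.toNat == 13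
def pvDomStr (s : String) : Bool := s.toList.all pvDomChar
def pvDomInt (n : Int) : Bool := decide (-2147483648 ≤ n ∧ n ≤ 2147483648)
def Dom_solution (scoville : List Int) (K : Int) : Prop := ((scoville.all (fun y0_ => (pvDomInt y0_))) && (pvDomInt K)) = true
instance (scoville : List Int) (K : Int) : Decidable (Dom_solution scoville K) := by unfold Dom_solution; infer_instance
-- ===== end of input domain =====

-- B replaces A's binary heap by the two-queue merge technique: sort once, feed mix
-- results into a FIFO, take each minimum by comparing the two queue fronts;
-- equivalence is about the RETURN value only (A heapifies its argument in place,
-- B does not mutate it).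

-- ===== PORT A =====
-- heappop is ported by its value semantics on the heap's multiset: it returns the
-- minimum element and leaves the remaining multiset (remove one occurrence of the
-- minimum); heappush adds its element to the multiset. This is exact for the returned
-- values: a heap of Ints determines, and is determined by, its multiset of elements.

-- termination helper for loopA (cited by its decreasing_by)
theorem erase_min_len {l : List Int} {m : Int} (hm : PySem.List.min? l (fun x => x) = some m) :
    ((PySem.List.remove? l m).getD []).length + 1 = l.length := by
  have hmem := PySem.List.min?_mem hm
  rw [PySem.List.remove?_eq_some_erase l m hmem]
  simp [List.length_erase_of_mem hmem]
  exact Nat.succ_pred_eq_of_pos (List.length_pos_of_mem hmem)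

def loopA (l : List Int) (K ans mn : Int) : Int :=
  if mn < K then
    if l.length ≤ 0 then -1
    else
      match h1 : PySem.List.min? l (fun x => x) with
      | none => -1  -- unreachable: l is nonempty
      | some s =>
        -- heappush of mn + 2*heappop, then heappop again
        match h2 : PySem.List.min? (((PySem.List.remove? l s).getD []) ++ [mn + 2 * s]) (fun x => x) with
        | none => -1  -- unreachable: l2 is nonempty
        | some mn2 => loopA ((PySem.List.remove? (((PySem.List.remove? l s).getD []) ++ [mn + 2 * s]) mn2).getD []) K (ans + 1) mn2
  else ans
termination_by l.length
decreasing_by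
  have e1 := erase_min_len h1
  have e2 := erase_min_len h2
  simp at e2 ⊢
  omega

def solution (scoville : List Int) (K : Int) : Int :=
  match PySem.List.min? scoville (fun x => x) with
  | none => -1  -- heappop of an empty heap: IndexError, excluded by Pre_solution
  | some m => loopA ((PySem.List.remove? scoville m).getD []) K 0 m

-- ===== PORT B =====
-- Source B's take(): return the smaller of the two queue fronts (base preferred on a
-- tie); the read positions i, j advancing over base/mixed are ported as the
-- unread suffixes of the two lists.

def takeB : List Int → List Int → Option (Int × List Int × List Int)
  | [], [] => none  -- take() on two exhausted queues: IndexError, excluded by Pre_solution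
  | [], m :: ms => some (m, [], ms)
  | b :: bs, [] => some (b, bs, [])
  | b :: bs, m :: ms => if b ≤ m then some (b, bs, m :: ms) else some (m, b :: bs, ms)

-- termination helper for loopB (cited by its decreasing_by)
theorem takeB_len {b m : List Int} {v : Int} {b' m' : List Int}
    (h : takeB b m = some (v, b', m')) : b'.length + m'.length + 1 = b.length + m.length := by
  cases b with
  | nil =>
    cases m with
    | nil => simp [takeB] at h
    | cons y ys => simp [takeB] at h; obtain ⟨rfl, rfl, rfl⟩ := h; simp
  | cons x xs =>
    cases m with
    | nil => simp [takeB] at h; obtain ⟨rfl, rfl, rfl⟩ := h; simp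
    | cons y ys =>
      simp only [takeB] at h
      split at h <;> (simp at h; obtain ⟨rfl, rfl, rfl⟩ := h; simp) <;> omega

def loopB (base mixed : List Int) (K ans mn : Int) : Int :=
  if mn < K then
    if base = [] ∧ mixed = [] then -1
    else
      match h1 : takeB base mixed with
      | none => -1  -- unreachable: not both queues are empty
      | some (second, b1, m1) =>
        match h2 : takeB b1 (m1 ++ [mn + 2 * second]) with
        | none => -1  -- unreachable: the mixed queue just received an element
        | some (mn2, b2, m2) => loopB b2 m2 K (ans + 1) mn2
  else ans
termination_by base.length + mixed.length
decreasing_by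
  have e1 := takeB_len h1
  have e2 := takeB_len h2
  simp at e2
  omega

def solution_alt (scoville : List Int) (K : Int) : Int :=
  match takeB (PySem.List.sorted scoville (fun x => x) false) [] with
  | none => -1  -- first take() on empty input: IndexError, excluded by Pre_solution
  | some (first, b, m) => loopB b m K 0 first

-- ===== PRECONDITION & SPEC =====
-- Pre_ excludes exactly the empty list, on which A raises IndexError (heappop of an
-- empty heap); B raises IndexError there too (take() with both queues empty).
def Pre_solution (scoville : List Int) (K : Int) : Prop := scoville ≠ []
instance (scoville : List Int) (K : Int) : Decidable (Pre_solution scoville K) := by unfold Pre_solution; infer_instance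
def pvWitness_solution : List Int × Int := ([1, 2, 3, 9, 10, 12], 7)

def Spec_solution (scoville : List Int) (K : Int) (out : Int) : Prop := out = solution_alt scoville K
instance (scoville : List Int) (K : Int) (out : Int) : Decidable (Spec_solution scoville K out) := by unfold Spec_solution; infer_instance

-- ===== CLAIM (what is proved, stated in full; the proofs are below) =====
def Claim_equal_solution : Prop := ∀ (scoville : List Int) (K : Int), Dom_solution scoville K → Pre_solution scoville K → Spec_solution scoville K (solution scoville K)

-- ===== LEMMAS AND PROOFS =====

-- min? of a list is any element that bounds the list from below
theorem min?_eq_of {l : List Int} {v : Int} (hv : v ∈ l) (hmin : ∀ y ∈ l, v ≤ y) :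
    PySem.List.min? l (fun x => x) = some v := by
  cases h : PySem.List.min? l (fun x => x) with
  | none => exact absurd ((PySem.List.min?_eq_none_iff _ _).mp h ▸ hv) List.not_mem_nil
  | some m =>
    have h1 : m ≤ v := PySem.List.min?_isMin h v hv
    have h2 : v ≤ m := hmin m (PySem.List.min?_mem h)
    rw [le_antisymm h1 h2]

-- takeB on two sorted queues pops the head of one of them, and that head bounds
-- everything left from below
theorem takeB_spec (base mixed : List Int)
    (hb : base.Pairwise (· ≤ ·)) (hm : mixed.Pairwise (· ≤ ·))
    (hne : base ≠ [] ∨ mixed ≠ []) :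
    ∃ v b' m', takeB base mixed = some (v, b', m') ∧
      (∀ x ∈ b' ++ m', v ≤ x) ∧
      ((base = v :: b' ∧ m' = mixed) ∨ (mixed = v :: m' ∧ b' = base)) := by
  cases base with
  | nil =>
    cases mixed with
    | nil => simp at hne
    | cons y ys =>
      refine ⟨y, [], ys, rfl, ?_, Or.inr ⟨rfl, rfl⟩⟩
      intro x hx
      simp at hx
      exact (List.pairwise_cons.mp hm).1 x hx
  | cons b bs =>
    cases mixed with
    | nil =>
      refine ⟨b, bs, [], rfl, ?_, Or.inl ⟨rfl, rfl⟩⟩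
      intro x hx
      simp at hx
      exact (List.pairwise_cons.mp hb).1 x hx
    | cons y ys =>
      by_cases hby : b ≤ y
      · refine ⟨b, bs, y :: ys, by simp [takeB, hby], ?_, Or.inl ⟨rfl, rfl⟩⟩
        intro x hx
        rcases List.mem_append.mp hx with hx | hx
        · exact (List.pairwise_cons.mp hb).1 x hx
        · rcases List.mem_cons.mp hx with rfl | hx
          · exact hby
          · exact le_trans hby ((List.pairwise_cons.mp hm).1 x hx)
      · refine ⟨y, b :: bs, ys, by simp [takeB, hby], ?_, Or.inr ⟨rfl, rfl⟩⟩
        intro x hx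
        rcases List.mem_append.mp hx with hx | hx
        · rcases List.mem_cons.mp hx with rfl | hx
          · omega
          · exact le_trans (by omega) ((List.pairwise_cons.mp hb).1 x hx)
        · exact (List.pairwise_cons.mp hm).1 x hx

-- the popped head with the remaining queues is a permutation of the merged queues
theorem takeB_perm {base mixed : List Int} {v : Int} {b' m' : List Int}
    (hS : (base = v :: b' ∧ m' = mixed) ∨ (mixed = v :: m' ∧ b' = base)) :
    (v :: (b' ++ m')).Perm (base ++ mixed) := by
  rcases hS with ⟨rfl, rfl⟩ | ⟨rfl, rfl⟩
  · rfl
  · exact List.perm_middle.symm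

-- a sorted permutation of l names l's minimum and its erase (used at the entry)
theorem sorted_head_min {l s : List Int} {m : Int} {t : List Int}
    (hperm : s.Perm l) (hsort : s.Pairwise (· ≤ ·)) (hs : s = m :: t) :
    PySem.List.min? l (fun x => x) = some m ∧
    (PySem.List.remove? l m).getD [] = l.erase m ∧
    t.Perm (l.erase m) := by
  subst hs
  have hml : m ∈ l := hperm.mem_iff.mp (List.mem_cons_self)
  have hmin : ∀ y ∈ l, m ≤ y := by
    intro y hy
    rcases List.mem_cons.mp (hperm.mem_iff.mpr hy) with rfl | hyt
    · exact le_refl _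
    · exact (List.pairwise_cons.mp hsort).1 _ hyt
  refine ⟨min?_eq_of hml hmin, ?_, ?_⟩
  · rw [PySem.List.remove?_eq_some_erase l m hml]; rfl
  · have := hperm.erase m
    simpa [List.erase_cons_head] using this

-- main loop invariant: A's multiset l is a permutation of base ++ mixed, both
-- queues are sorted, mn bounds everything from below, and every queued mix value
-- is at most 3 * mn (which is what keeps the mixed FIFO sorted)
theorem loopAB (n : Nat) : ∀ (l base mixed : List Int) (K ans mn : Int),
    l.length = n → (base ++ mixed).Perm l →
    base.Pairwise (· ≤ ·) → mixed.Pairwise (· ≤ ·) →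
    (∀ x ∈ base ++ mixed, mn ≤ x) →
    (∀ x ∈ mixed, x ≤ 3 * mn) →
    loopA l K ans mn = loopB base mixed K ans mn := by
  induction n using Nat.strong_induction_on with
  | _ n ih =>
    intro l base mixed K ans mn hn hperm hb hm hlow hq
    rw [loopA.eq_def, loopB.eq_def]
    by_cases hK : mn < K
    · simp only [if_pos hK]
      by_cases hboth : base = [] ∧ mixed = []
      · obtain ⟨rfl, rfl⟩ := hboth
        have : l = [] := hperm.symm.eq_nil
        subst this
        simp
      · have hne : base ≠ [] ∨ mixed ≠ [] := by tauto
        obtain ⟨v, b1, m1, htake, hvmin, hS⟩ := takeB_spec base mixed hb hm hne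
        have hp1 : (v :: (b1 ++ m1)).Perm (base ++ mixed) := takeB_perm hS
        have hvl : v ∈ l := hperm.mem_iff.mp (hp1.mem_iff.mp List.mem_cons_self)
        have hlen0 : ¬ l.length ≤ 0 := by
          have := List.length_pos_of_mem hvl; omega
        simp only [if_neg hlen0, if_neg hboth]
        have hminl : ∀ y ∈ l, v ≤ y := by
          intro y hy
          rcases List.mem_cons.mp (hp1.mem_iff.mpr (hperm.mem_iff.mpr hy)) with rfl | hy'
          · exact le_refl _
          · exact hvmin y hy'
        have hmin1 : PySem.List.min? l (fun x => x) = some v := min?_eq_of hvl hminl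
        have hrem1 : (PySem.List.remove? l v).getD [] = l.erase v := by
          rw [PySem.List.remove?_eq_some_erase l v hvl]; rfl
        have ht : (b1 ++ m1).Perm (l.erase v) :=
          List.Perm.cons_inv (hp1.trans (hperm.trans (List.perm_cons_erase hvl)))
        have hvm : mn ≤ v := hlow v (hp1.mem_iff.mp List.mem_cons_self)
        have hq1 : ∀ x ∈ m1, x ≤ 3 * mn := by
          intro x hx
          rcases hS with ⟨_, rfl⟩ | ⟨hmx, _⟩
          · exact hq x hx
          · exact hq x (hmx ▸ List.mem_cons_of_mem _ hx)
        have hb1 : b1.Pairwise (· ≤ ·) := by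
          rcases hS with ⟨hbx, _⟩ | ⟨_, rfl⟩
          · exact (List.pairwise_cons.mp (hbx ▸ hb)).2
          · exact hb
        have hm1 : m1.Pairwise (· ≤ ·) := by
          rcases hS with ⟨_, rfl⟩ | ⟨hmx, _⟩
          · exact hm
          · exact (List.pairwise_cons.mp (hmx ▸ hm)).2
        have hm1y : (m1 ++ [mn + 2 * v]).Pairwise (· ≤ ·) := by
          rw [List.pairwise_append]
          refine ⟨hm1, by simp, ?_⟩
          intro a ha b hbm
          rcases List.mem_singleton.mp hbm with rfl
          have := hq1 a ha
          omega
        obtain ⟨v2, b2, m2, htake2, hv2min, hS2⟩ :=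
          takeB_spec b1 (m1 ++ [mn + 2 * v]) hb1 hm1y (Or.inr (by simp))
        have hp2 : (v2 :: (b2 ++ m2)).Perm (b1 ++ (m1 ++ [mn + 2 * v])) := takeB_perm hS2
        have hp2' : (v2 :: (b2 ++ m2)).Perm ((l.erase v) ++ [mn + 2 * v]) := by
          refine hp2.trans ?_
          rw [← List.append_assoc]
          exact ht.append_right _
        have hv2l2 : v2 ∈ (l.erase v) ++ [mn + 2 * v] := hp2'.mem_iff.mp List.mem_cons_self
        have hminl2 : ∀ y ∈ (l.erase v) ++ [mn + 2 * v], v2 ≤ y := by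
          intro y hy
          rcases List.mem_cons.mp (hp2'.mem_iff.mpr hy) with rfl | hy'
          · exact le_refl _
          · exact hv2min y hy'
        have hmin2 : PySem.List.min? ((l.erase v) ++ [mn + 2 * v]) (fun x => x) = some v2 :=
          min?_eq_of hv2l2 hminl2
        have hrem2 : (PySem.List.remove? ((l.erase v) ++ [mn + 2 * v]) v2).getD []
            = ((l.erase v) ++ [mn + 2 * v]).erase v2 := by
          rw [PySem.List.remove?_eq_some_erase _ v2 hv2l2]; rfl
        have hvle2 : m2 ≠ [] → v ≤ v2 := by
          intro hne2
          rcases hS2 with ⟨hbx, _⟩ | ⟨hmx, _⟩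
          · exact hvmin v2 (List.mem_append_left _ (hbx ▸ List.mem_cons_self))
          · cases hm1c : m1 with
            | nil =>
              rw [hm1c] at hmx
              simp at hmx
              exact absurd hmx.2 hne2
            | cons h1 t1 =>
              rw [hm1c] at hmx
              have hh : v2 = h1 := by
                have := congrArg List.head? hmx
                simpa using this.symm
              exact hvmin v2 (List.mem_append_right _ (hm1c ▸ hh ▸ List.mem_cons_self))
        have hlt : (((l.erase v) ++ [mn + 2 * v]).erase v2).length < n := by
          have e1 := List.length_erase_of_mem hvl
          have e2 := List.length_erase_of_mem hv2l2
          have hpos := List.length_pos_of_mem hvl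
          simp only [List.length_append, List.length_cons, List.length_nil] at e2 ⊢
          omega
        have hrec : loopA (((l.erase v) ++ [mn + 2 * v]).erase v2) K (ans + 1) v2
            = loopB b2 m2 K (ans + 1) v2 := by
          refine ih _ hlt _ b2 m2 K (ans + 1) v2 rfl ?_ ?_ ?_ ?_ ?_
          · exact List.Perm.cons_inv (hp2'.trans (List.perm_cons_erase hv2l2))
          · rcases hS2 with ⟨hbx, _⟩ | ⟨_, rfl⟩
            · exact (List.pairwise_cons.mp (hbx ▸ hb1)).2
            · exact hb1
          · rcases hS2 with ⟨_, rfl⟩ | ⟨hmx, _⟩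
            · exact hm1y
            · exact (List.pairwise_cons.mp (hmx ▸ hm1y)).2
          · exact hv2min
          · intro x hx
            have hxq : x ∈ m1 ++ [mn + 2 * v] := by
              rcases hS2 with ⟨_, rfl⟩ | ⟨hmx, _⟩
              · exact hx
              · exact hmx ▸ List.mem_cons_of_mem _ hx
            have hsle : v ≤ v2 := hvle2 (by
              intro hnil
              rw [hnil] at hx
              exact List.not_mem_nil hx)
            rcases List.mem_append.mp hxq with hx1 | hx1
            · have h1 := hq1 x hx1
              have h2 := hvmin x (List.mem_append_right _ hx1)
              omega
            · rcases List.mem_singleton.mp hx1 with rfl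
              omega
        -- reduce A's two matches, then B's two matches
        split
        · rename_i h; rw [hmin1] at h; cases h
        rename_i s h
        rw [hmin1] at h
        injection h with h
        subst h
        rw [hrem1]
        split
        · rename_i h; rw [hmin2] at h; cases h
        rename_i mn2 h
        rw [hmin2] at h
        injection h with h
        subst h
        rw [hrem2]
        rw [htake]
        split
        · rename_i heq; cases heq
        rename_i second b1' m1' heq
        simp only [Option.some.injEq, Prod.mk.injEq] at heq
        obtain ⟨rfl, rfl, rfl⟩ := heq
        rw [htake2]
        split
        · rename_i heq; cases heq
        rename_i mn2' b2' m2' heq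
        simp only [Option.some.injEq, Prod.mk.injEq] at heq
        obtain ⟨rfl, rfl, rfl⟩ := heq
        exact hrec
    · simp [hK]

-- ===== VERDICT (by name: the statement is the Claim_ definition above) =====
theorem solution_spec : Claim_equal_solution := by
  intro scoville K _ hpre
  unfold Spec_solution solution solution_alt
  have hperm := PySem.List.sorted_perm scoville (fun x => x) false
  have hsort := PySem.List.sorted_pairwise scoville (fun x => x)
  cases hs : PySem.List.sorted scoville (fun x => x) false with
  | nil => exact absurd ((PySem.List.sorted_eq_nil_iff _ _ _).mp hs) hpre
  | cons first pot =>
    obtain ⟨hmin, hrem, hpermt⟩ := sorted_head_min hperm hsort hs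
    simp only [hmin, hrem, takeB]
    refine loopAB (scoville.erase first).length _ _ _ K 0 first rfl (by simpa using hpermt) ?_ (by simp) ?_ (by simp)
    · exact (List.pairwise_cons.mp (hs ▸ hsort)).2
    · intro x hx
      simp at hx
      exact (List.pairwise_cons.mp (hs ▸ hsort)).1 x hx
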